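-- pv_equiv track=rewrite | github.com/bethany-wong/advenntofcode2024 | day15.py | can_move_boxes
-- ===== SOURCE A (Python) =====
-- def is_in_map(i, j, map):
--     return i >= 0 and i < len(map) and j >= 0 and j < len(map[0])
--
-- def can_move_boxes(current_box, direction, boxes_left, boxes_right, walls): # given left edge of current box
--     i, j = current_box
--     new_left = (i + direction[0], j + direction[1])
--     new_right = (i + direction[0], j + 1 + direction[1])
--     if not is_in_map(new_left[0], new_left[1], walls) or walls[new_left[0]][new_left[1]] or not is_in_map(new_right[0], new_right[1], walls) or walls[new_right[0]][new_right[1]]: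
--         return False
--     for pos in [new_left, new_right]:
--         if boxes_left[pos[0]][pos[1]]:
--             if not can_move_boxes(pos, direction, boxes_left, boxes_right, walls):
--                 return False
--         elif boxes_right[pos[0]][pos[1]]:
--             if not can_move_boxes((pos[0], pos[1] - 1), direction, boxes_left, boxes_right, walls):
--                 return False
--     return True
-- ===== SOURCE B (Python) =====
-- def is_in_map(i, j, map):
--     return i >= 0 and i < len(map) and j >= 0 and j < len(map[0])
--
-- def can_move_boxes(current_box, direction, boxes_left, boxes_right, walls):
--     # breadth-first row sweep: push the whole frontier of touched boxes one
--     # level at a time, keeping each level's left-edge columns in a set, so a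
--     # box shared by several parents is examined once per level, not once per
--     # path as in the recursive version.
--     di, dj = direction
--     i = current_box[0]
--     js = {current_box[1]}
--     while js:
--         ni = i + di
--         njs = set()
--         for j in js:
--             for jj in (j + dj, j + 1 + dj):
--                 if not is_in_map(ni, jj, walls) or walls[ni][jj]:
--                     return False
--             for jj in (j + dj, j + 1 + dj):
--                 if boxes_left[ni][jj]:
--                     njs.add(jj)
--                 elif boxes_right[ni][jj]:
--                     njs.add(jj - 1)
--         i, js = ni, njs
--     return True
-- ===== Notes on version B (the rewrite author's own statement) =====
-- stated objective: alternative
-- what changed: Replaces A's recursive DFS, which re-explores a box once per path reaching it, by an iterative breadth-first row sweep that keeps each level's touched box columns in a set, examining each box at most once per level.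
import Mathlib
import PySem

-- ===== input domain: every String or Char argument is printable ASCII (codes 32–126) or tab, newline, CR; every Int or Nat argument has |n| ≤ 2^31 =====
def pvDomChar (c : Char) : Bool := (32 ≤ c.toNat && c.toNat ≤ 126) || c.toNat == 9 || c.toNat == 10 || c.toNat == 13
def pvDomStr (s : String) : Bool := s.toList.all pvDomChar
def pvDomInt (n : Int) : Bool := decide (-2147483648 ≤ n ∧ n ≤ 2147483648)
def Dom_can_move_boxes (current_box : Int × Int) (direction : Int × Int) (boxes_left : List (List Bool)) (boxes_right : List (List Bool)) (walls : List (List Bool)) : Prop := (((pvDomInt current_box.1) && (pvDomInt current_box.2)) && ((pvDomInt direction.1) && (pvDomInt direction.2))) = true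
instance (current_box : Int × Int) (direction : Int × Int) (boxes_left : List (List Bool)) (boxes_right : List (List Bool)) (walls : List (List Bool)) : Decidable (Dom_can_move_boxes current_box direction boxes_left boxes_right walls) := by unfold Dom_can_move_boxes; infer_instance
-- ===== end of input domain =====

-- B replaces A's recursive DFS (which re-explores a box once per path reaching it) by an
-- iterative breadth-first row sweep keeping each level's touched box columns in a set.

-- shared primitive helpers (the Python modules share is_in_map; grid indexing is the same g[i][j])
-- is_in_map: Python's `len(map[0])` is only reached when 0 ≤ i < len(map) (short-circuit `and`),
-- so `headD []` is exact there; for map = [] both sides are False before map[0] is evaluated.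
def pv_is_in_map (i : Int) (j : Int) (m : List (List Bool)) : Bool :=
  decide (0 ≤ i) && decide (i < (m.length : Int)) && decide (0 ≤ j) && decide (j < ((m.headD []).length : Int))

-- g[i][j]: totality guard `.getD false`; exact wherever the Python indexes without raising
-- (under Pre_ every index used has passed pv_is_in_map and the three grids share one shape).
def pvCell (g : List (List Bool)) (i : Int) (j : Int) : Bool :=
  ((PySem.List.pyGet? g i).bind (fun r => PySem.List.pyGet? r j)).getD false

-- fuel: a pure totality guard, never exhausted on inputs satisfying Pre_ (recursion depth /
-- sweep length is bounded by rows + cols + 2 there); both ports step fuel identically.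
def pvFuel (walls : List (List Bool)) : Nat := walls.length + (walls.headD []).length + 2

-- ===== PORT A =====
-- literal transliteration of A's recursion (new_left / new_right inlined; the for-loop with
-- early `return False` is the short-circuiting List.all over [new_left, new_right])
def pvGoA (fuel : Nat) (cb : Int × Int) (dir : Int × Int) (bl br walls : List (List Bool)) : Bool :=
  match fuel with
  | 0 => false
  | f + 1 =>
    if !pv_is_in_map (cb.1 + dir.1) (cb.2 + dir.2) walls || pvCell walls (cb.1 + dir.1) (cb.2 + dir.2)
        || !pv_is_in_map (cb.1 + dir.1) (cb.2 + 1 + dir.2) walls || pvCell walls (cb.1 + dir.1) (cb.2 + 1 + dir.2) then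
      false
    else
      [((cb.1 + dir.1 : Int), (cb.2 + dir.2 : Int)), ((cb.1 + dir.1 : Int), (cb.2 + 1 + dir.2 : Int))].all
        (fun pos =>
          if pvCell bl pos.1 pos.2 then pvGoA f pos dir bl br walls
          else if pvCell br pos.1 pos.2 then pvGoA f (pos.1, pos.2 - 1) dir bl br walls
          else true)

def can_move_boxes (current_box : Int × Int) (direction : Int × Int) (boxes_left : List (List Bool)) (boxes_right : List (List Bool)) (walls : List (List Bool)) : Bool :=
  pvGoA (pvFuel walls) current_box direction boxes_left boxes_right walls

-- ===== PORT B =====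
-- `if boxes_left[ni][jj]: njs.add(jj) elif boxes_right[ni][jj]: njs.add(jj-1)`
def pvAddCell (bl br : List (List Bool)) (ni : Int) (s : PySem.Set Int) (jj : Int) : PySem.Set Int :=
  if pvCell bl ni jj then PySem.Set.add s jj
  else if pvCell br ni jj then PySem.Set.add s (jj - 1)
  else s

-- one `for j in js` body; `none` = the early `return False` (the Bool result is independent of
-- the set's iteration order: it is a conjunction of the per-j checks plus the union of children)
def pvLevelStep (dir : Int × Int) (bl br walls : List (List Bool)) (ni : Int)
    (acc : Option (PySem.Set Int)) (j : Int) : Option (PySem.Set Int) :=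
  acc.bind (fun s =>
    if !pv_is_in_map ni (j + dir.2) walls || pvCell walls ni (j + dir.2)
        || !pv_is_in_map ni (j + 1 + dir.2) walls || pvCell walls ni (j + 1 + dir.2) then none
    else some (pvAddCell bl br ni (pvAddCell bl br ni s (j + dir.2)) (j + 1 + dir.2)))

-- the `while js:` loop of Source B
def pvGoB (fuel : Nat) (dir : Int × Int) (bl br walls : List (List Bool)) (i : Int) (js : PySem.Set Int) : Bool :=
  if js.isEmpty then true
  else
    match fuel with
    | 0 => false
    | f + 1 =>
      match js.foldl (pvLevelStep dir bl br walls (i + dir.1)) (some PySem.Set.empty) with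
      | none => false
      | some njs => pvGoB f dir bl br walls (i + dir.1) njs

def can_move_boxes_alt (current_box : Int × Int) (direction : Int × Int) (boxes_left : List (List Bool)) (boxes_right : List (List Bool)) (walls : List (List Bool)) : Bool :=
  pvGoB (pvFuel walls) direction boxes_left boxes_right walls current_box.1
    (PySem.Set.add PySem.Set.empty current_box.2)

-- ===== PRECONDITION & SPEC =====
-- helpers for Pre_ only (plain List.getD/length, independent of the ports):
-- target cell inside the walls map (A's is_in_map), and a raise-free read of walls[i][j]
def pvPreInMap (walls : List (List Bool)) (i j : Int) : Prop :=
  0 ≤ i ∧ i < (walls.length : Int) ∧ 0 ≤ j ∧ j < ((walls.headD []).length : Int)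

def pvPreWallIs (walls : List (List Bool)) (i j : Int) (v : Bool) : Prop :=
  pvPreInMap walls i j ∧ j < (((walls.getD i.toNat []).length : Nat) : Int)
    ∧ (walls.getD i.toNat []).getD j.toNat false = v

-- the very first bounds/wall check of A already fails (left cell off-map or a wall, or left cell
-- free and the right cell off-map or a wall): A answers False before touching the box grids
def pvPreFirstBlocked (current_box direction : Int × Int) (walls : List (List Bool)) : Prop :=
  ¬ pvPreInMap walls (current_box.1 + direction.1) (current_box.2 + direction.2)
  ∨ pvPreWallIs walls (current_box.1 + direction.1) (current_box.2 + direction.2) true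
  ∨ (pvPreWallIs walls (current_box.1 + direction.1) (current_box.2 + direction.2) false
     ∧ (¬ pvPreInMap walls (current_box.1 + direction.1) (current_box.2 + 1 + direction.2)
        ∨ pvPreWallIs walls (current_box.1 + direction.1) (current_box.2 + 1 + direction.2) true))

-- Unless the first check already answers False (first disjunct), Pre_ excludes (a) directions with
-- row-step 0 and column-step in {-1,0,1}, on which both A and B can recurse/loop forever (a pushed
-- box can re-trigger itself, e.g. via its own right half), and (b) grids that are ragged or of
-- mismatched shapes, on which A can raise IndexError; inside Pre_ the Pythons terminate and the
-- fuelled ports never exhaust their fuel.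
def Pre_can_move_boxes (current_box : Int × Int) (direction : Int × Int) (boxes_left : List (List Bool)) (boxes_right : List (List Bool)) (walls : List (List Bool)) : Prop :=
  pvPreFirstBlocked current_box direction walls
  ∨ ((direction.1 ≠ 0 ∨ direction.2 ≤ -2 ∨ 2 ≤ direction.2)
     ∧ boxes_left.length = walls.length ∧ boxes_right.length = walls.length
     ∧ (∀ r ∈ walls, r.length = (walls.headD []).length)
     ∧ (∀ r ∈ boxes_left, r.length = (walls.headD []).length)
     ∧ (∀ r ∈ boxes_right, r.length = (walls.headD []).length))

instance (current_box : Int × Int) (direction : Int × Int) (boxes_left : List (List Bool)) (boxes_right : List (List Bool)) (walls : List (List Bool)) : Decidable (Pre_can_move_boxes current_box direction boxes_left boxes_right walls) := by unfold Pre_can_move_boxes pvPreFirstBlocked pvPreWallIs pvPreInMap; infer_instance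

def pvWitness_can_move_boxes : (Int × Int) × (Int × Int) × List (List Bool) × List (List Bool) × List (List Bool) :=
  ((0, 0), (1, 0), [[false, false], [true, false]], [[false, true], [false, false]], [[false, false], [false, false]])

def Spec_can_move_boxes (current_box : Int × Int) (direction : Int × Int) (boxes_left : List (List Bool)) (boxes_right : List (List Bool)) (walls : List (List Bool)) (out : Bool) : Prop := out = can_move_boxes_alt current_box direction boxes_left boxes_right walls
instance (current_box : Int × Int) (direction : Int × Int) (boxes_left : List (List Bool)) (boxes_right : List (List Bool)) (walls : List (List Bool)) (out : Bool) : Decidable (Spec_can_move_boxes current_box direction boxes_left boxes_right walls out) := by unfold Spec_can_move_boxes; infer_instance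

-- ===== CLAIM (what is proved, stated in full; the proofs are below) =====
def Claim_equal_can_move_boxes : Prop := ∀ (current_box : Int × Int) (direction : Int × Int) (boxes_left : List (List Bool)) (boxes_right : List (List Bool)) (walls : List (List Bool)), Dom_can_move_boxes current_box direction boxes_left boxes_right walls → Pre_can_move_boxes current_box direction boxes_left boxes_right walls → Spec_can_move_boxes current_box direction boxes_left boxes_right walls (can_move_boxes current_box direction boxes_left boxes_right walls)

-- ===== LEMMAS AND PROOFS =====

-- the wall/bounds check A performs for the box with left edge (i, j), at target row ni = i + dir.1
def pvBlk (dir : Int × Int) (walls : List (List Bool)) (ni : Int) (j : Int) : Bool :=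
  !pv_is_in_map ni (j + dir.2) walls || pvCell walls ni (j + dir.2)
  || !pv_is_in_map ni (j + 1 + dir.2) walls || pvCell walls ni (j + 1 + dir.2)

-- left-edge columns of the (at most two) boxes occupying one target cell / the two target cells
def pvCellKids (bl br : List (List Bool)) (ni : Int) (jj : Int) : List Int :=
  if pvCell bl ni jj then [jj] else if pvCell br ni jj then [jj - 1] else []

def pvKids (dir : Int × Int) (bl br : List (List Bool)) (ni : Int) (j : Int) : List Int :=
  pvCellKids bl br ni (j + dir.2) ++ pvCellKids bl br ni (j + 1 + dir.2)

lemma mem_pvAddCell (bl br : List (List Bool)) (ni : Int) (s : PySem.Set Int) (jj x : Int) :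
    x ∈ pvAddCell bl br ni s jj ↔ x ∈ s ∨ x ∈ pvCellKids bl br ni jj := by
  unfold pvAddCell pvCellKids
  split_ifs <;> simp [PySem.Set.mem_add]

lemma pvGoA_succ (f : Nat) (i j : Int) (dir : Int × Int) (bl br walls : List (List Bool)) :
    pvGoA (f + 1) (i, j) dir bl br walls =
      if pvBlk dir walls (i + dir.1) j then false
      else (pvKids dir bl br (i + dir.1) j).all (fun c => pvGoA f (i + dir.1, c) dir bl br walls) := by
  have hunf : pvGoA (f + 1) (i, j) dir bl br walls =
      if pvBlk dir walls (i + dir.1) j then false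
      else [((i + dir.1 : Int), (j + dir.2 : Int)), ((i + dir.1 : Int), (j + 1 + dir.2 : Int))].all
        (fun pos =>
          if pvCell bl pos.1 pos.2 then pvGoA f pos dir bl br walls
          else if pvCell br pos.1 pos.2 then pvGoA f (pos.1, pos.2 - 1) dir bl br walls
          else true) := rfl
  rw [hunf]
  by_cases h : pvBlk dir walls (i + dir.1) j = true
  · rw [if_pos h, if_pos h]
  · rw [if_neg h, if_neg h]
    unfold pvKids pvCellKids
    by_cases c1 : pvCell bl (i + dir.1) (j + dir.2) = true <;>
      by_cases c2 : pvCell br (i + dir.1) (j + dir.2) = true <;>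
      by_cases c3 : pvCell bl (i + dir.1) (j + 1 + dir.2) = true <;>
      by_cases c4 : pvCell br (i + dir.1) (j + 1 + dir.2) = true <;>
      simp [c1, c2, c3, c4]

-- folding pvLevelStep from `some s`: none iff some box of the level is blocked, else the union of kids
lemma foldl_level_eq (dir : Int × Int) (bl br walls : List (List Bool)) (ni : Int) :
    ∀ (js : List Int) (s : PySem.Set Int),
      js.foldl (pvLevelStep dir bl br walls ni) (some s)
        = if js.any (fun j => pvBlk dir walls ni j) then none
          else some (js.foldl (fun s j => pvAddCell bl br ni (pvAddCell bl br ni s (j + dir.2)) (j + 1 + dir.2)) s) := by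
  intro js
  induction js with
  | nil => intro s; simp
  | cons j js ih =>
    intro s
    have hstep : pvLevelStep dir bl br walls ni (some s) j
        = if pvBlk dir walls ni j then none
          else some (pvAddCell bl br ni (pvAddCell bl br ni s (j + dir.2)) (j + 1 + dir.2)) := rfl
    by_cases hb : pvBlk dir walls ni j = true
    · have hnone : ∀ (l : List Int), l.foldl (pvLevelStep dir bl br walls ni) none = none := by
        intro l; induction l with
        | nil => rfl
        | cons a l ihl => simpa [pvLevelStep] using ihl
      simp [List.foldl_cons, hstep, hb, hnone]
    · have hb' : pvBlk dir walls ni j = false := by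
        revert hb; cases pvBlk dir walls ni j <;> simp
      simp [List.foldl_cons, hstep, hb', ih]

lemma mem_foldl_addTwo (dir : Int × Int) (bl br : List (List Bool)) (ni : Int) :
    ∀ (js : List Int) (s : PySem.Set Int) (x : Int),
      x ∈ js.foldl (fun s j => pvAddCell bl br ni (pvAddCell bl br ni s (j + dir.2)) (j + 1 + dir.2)) s
        ↔ x ∈ s ∨ ∃ j ∈ js, x ∈ pvKids dir bl br ni j := by
  intro js
  induction js with
  | nil => intro s x; simp
  | cons j js ih =>
    intro s x
    rw [List.foldl_cons, ih]
    simp [mem_pvAddCell, pvKids, or_assoc, or_left_comm, and_or_left, exists_or]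

-- main invariant: the sweep on a level set equals the conjunction of A's recursion over its members
lemma pvGoB_eq_all (dir : Int × Int) (bl br walls : List (List Bool)) :
    ∀ (f : Nat) (i : Int) (js : PySem.Set Int),
      pvGoB f dir bl br walls i js = js.all (fun j => pvGoA f (i, j) dir bl br walls) := by
  intro f
  induction f with
  | zero =>
    intro i js
    cases js with
    | nil => rfl
    | cons j js => simp [pvGoB, pvGoA]
  | succ f ih =>
    intro i js
    cases js with
    | nil => rfl
    | cons j0 js0 =>
      rw [show pvGoB (f + 1) dir bl br walls i (j0 :: js0)
            = (match (j0 :: js0 : List Int).foldl (pvLevelStep dir bl br walls (i + dir.1)) (some PySem.Set.empty) with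
               | none => false
               | some njs => pvGoB f dir bl br walls (i + dir.1) njs) from rfl]
      rw [foldl_level_eq]
      by_cases hb : ((j0 :: js0 : List Int).any fun j => pvBlk dir walls (i + dir.1) j) = true
      · rw [if_pos hb]
        rcases List.any_eq_true.mp hb with ⟨j, hj, hjb⟩
        have hfalse : ((j0 :: js0 : List Int).all fun j => pvGoA (f + 1) (i, j) dir bl br walls) = false :=
          List.all_eq_false.mpr ⟨j, hj, by rw [pvGoA_succ, if_pos hjb]; simp⟩
        rw [hfalse]
      · rw [if_neg hb]
        have hball : ∀ j ∈ (j0 :: js0 : List Int), pvBlk dir walls (i + dir.1) j = false := by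
          intro j hj
          by_contra hc
          exact hb (List.any_eq_true.mpr ⟨j, hj, by simpa using hc⟩)
        show pvGoB f dir bl br walls (i + dir.1)
            ((j0 :: js0 : List Int).foldl
              (fun s j => pvAddCell bl br (i + dir.1) (pvAddCell bl br (i + dir.1) s (j + dir.2)) (j + 1 + dir.2))
              PySem.Set.empty)
          = _
        rw [ih]
        rw [Bool.eq_iff_iff, List.all_eq_true, List.all_eq_true]
        constructor
        · intro h j hj
          rw [pvGoA_succ, if_neg (by simp [hball j hj]), List.all_eq_true]
          intro c hc
          exact h c ((mem_foldl_addTwo dir bl br (i + dir.1) _ _ c).mpr (Or.inr ⟨j, hj, hc⟩))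
        · intro h c hc
          rcases (mem_foldl_addTwo dir bl br (i + dir.1) _ _ c).mp hc with h0 | ⟨j, hj, hk⟩
          · simp [PySem.Set.empty] at h0
          · have := h j hj
            rw [pvGoA_succ, if_neg (by simp [hball j hj]), List.all_eq_true] at this
            exact this c hk

-- ===== VERDICT (by name: the statement is the Claim_ definition above) =====
theorem can_move_boxes_spec : Claim_equal_can_move_boxes := by
  intro cb dir bl br walls _ _
  unfold Spec_can_move_boxes can_move_boxes can_move_boxes_alt
  rw [pvGoB_eq_all]
  have hset : PySem.Set.add PySem.Set.empty cb.2 = [cb.2] := rfl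
  rw [hset]
  simp [List.all_cons]
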